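/- GENERATED by tools/from_farm_form.py from prooffarm-gif/accepted/DGifDecompressLine.P/Proof.lean (a worked proof of the farm's unit `DGifDecompressLine.P`,
   accepted by the verdict) — do not edit. -/
import Gif.Spec.Units.DGifDecompressLine_P
import Gif.Spec.AllSegs

open X86 X86.User Asan ProgX.Base ProgX.Base.Spec Gif.Spec

set_option maxRecDepth 4000
set_option maxHeartbeats 4000000

/-!
  `DGifDecompressLine.P` (0x106ae0 … 0x106b3d, 19 instructions; dgif_lib.c:861): THE PROLOGUE OF A PROTECTED FUNCTION, after the
  worked example farm.gif/worked/DGifGetWord.P (lemmas: Gif/Spec/FrameCarry.lean §1 – §3). Here the frame's base is `RA − 120`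
  (`ro = 120`, `ro' = 56`) while the body's stack pointer is `RA − 200` (`top'`), and `Body` also wants the three argument slots,
  `apart` and `LZOK` of the new memory. The blocks below:
    1. the prelude and the walk to the cut behind the last inline shadow store;
    2. `name_stores2`: the memory before the shadow stores gets the name `M0`, `hmem : s.mem = storesMem M0 (base / 8) F.prologue`;
    3. about `M0` (a nest of STACK stores over `e.mem`): the footprint `hsame0`, the saved registers' and the arguments' slots;
    4. `after_prologue` (`HeapInv` with the own frame pushed, `GifOK`, `rem`), `prologue_same` (the footprints), `LZOK.sameExcept`;
    5. the exit assertion `Entered`, field by field.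
-/

/-- The prologue of `DGifDecompressLine` establishes `Entered` at 0x106b3d (before `lea rdi, [rdi+70H]`, dgif_lib.c:866). -/
theorem Gif.Spec.Proved.DGifDecompressLine_P_ok : Gif.Spec.DGifDecompressLine_P.Statement := by
  intro Lay hLay μ hμ u₀ hcode H rest frames F R n e ret he hpre
  -- 1. THE PRELUDE: the entry's facts (`he_align`, `he_room`, `he_top`, `he_retAddr`, `he_df`, `he_mx` …), the precondition
  have he0 := he
  v_entry he
  have hpre0 := hpre
  obtain ⟨henv, hlz, hrdi, hrdx, hn, hline⟩ := hpre
  -- THE WALK (0x106ae0 … 0x106b3d), to the cut behind the last inline shadow store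
  u_walk hcode [hμ.vendor] until [Gif.L.DGifDecompressLine.at_106b3d] span [ProgX.Base.L.textLo, ProgX.Base.L.textHi] side (v_side)
  -- the stored `LineLen` is the ghost `n`
  have hp32 : (Word.part Width.w32 (e.reg .rdx)).toNat = n := by
    rw [toNat_part32]
    exact hrdx
  rw [hp32] at w_mem
  -- 2. NAMING THE MEMORY before the two shadow stores
  have e120 : (e.reg .rsp - 120).toNat = (e.reg .rsp).toNat - 120 := by u_omega
  obtain ⟨M0, hM0, hmem⟩ := name_stores2 (e.reg .rsp - 120) 12582912 12582916 0 4 4059165169 4 4 4092850948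
    w_mem (by omega) (by decide) (by decide) (by decide) (by decide)
  have hpro : Gif.Frames.DGifDecompressLine.prologue = [⟨0, 4, 4059165169⟩, ⟨4, 4, 4092850948⟩] := rfl
  rw [← hpro, e120] at hmem
  -- 3. ABOUT `M0`: only stack stores over `e.mem`
  have hsame0 : Mem.SameExcept [⟨(e.reg .rsp).toNat - 560, (e.reg .rsp).toNat⟩] e.mem M0 := by
    rw [hM0]
    u_same
  have k_r15 : M0.readLE (e.reg .rsp - 8) 8 = (e.reg .r15).toNat := by
    rw [hM0]
    u_read
  have k_r14 : M0.readLE (e.reg .rsp - 16) 8 = (e.reg .r14).toNat := by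
    rw [hM0]
    u_read
  have k_r13 : M0.readLE (e.reg .rsp - 24) 8 = (e.reg .r13).toNat := by
    rw [hM0]
    u_read
  have k_r12 : M0.readLE (e.reg .rsp - 32) 8 = (e.reg .r12).toNat := by
    rw [hM0]
    u_read
  have k_rbp : M0.readLE (e.reg .rsp - 40) 8 = (e.reg .rbp).toNat := by
    rw [hM0]
    u_read
  have k_rbx : M0.readLE (e.reg .rsp - 48) 8 = (e.reg .rbx).toNat := by
    rw [hM0]
    u_read
  have k_gif : M0.readLE (e.reg .rsp - 168) 8 = (e.reg .rdi).toNat := by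
    rw [hM0]
    u_read
  have k_len : M0.readLE (e.reg .rsp - 160) 4 = n := by
    rw [hM0]
    u_read
  have k_line : M0.readLE (e.reg .rsp - 152) 8 = (e.reg .rsi).toNat := by
    rw [hM0]
    u_read
  clear hM0 w_mem
  -- 4. THE ENVIRONMENT behind the prologue: the heap's invariant with the own frame pushed, the state invariant, the reader
  obtain ⟨hinv1, hok1, hrem1⟩ := after_prologue (top := (e.reg .rsp).toNat) (top' := (e.reg .rsp).toNat - 200) (ro := 120)
    (Fl := Gif.Frames.DGifDecompressLine) henv.heap.inv henv.ctx henv.ok Gif.Frames.DGifDecompressLine_ok rfl he_align hsame0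
    (by omega) (by omega) (by omega) (by omega)
  -- the prologue's own footprint, and the same in front of the contract's windows (`Body.same`)
  have hsame1 := prologue_same (top := (e.reg .rsp).toNat) (Fl := Gif.Frames.DGifDecompressLine)
    Gif.Frames.DGifDecompressLine_ok (ro := 120) (ro' := 56) rfl rfl he_align (by omega) (by omega) hsame0 []
  have hsame2 := prologue_same (top := (e.reg .rsp).toNat) (Fl := Gif.Frames.DGifDecompressLine)
    Gif.Frames.DGifDecompressLine_ok (ro := 120) (ro' := 56) rfl rfl he_align (by omega) (by omega) hsame0
    [⟨(e.reg .rsi).toNat, (e.reg .rsi).toNat + n⟩,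
     ⟨F.pv + 20, F.pv + 56⟩,
     ⟨F.pv + 88, F.pv + 344⟩,
     ⟨F.pv + 344, F.pv + 4439⟩,
     ⟨F.pv + 4439, F.pv + 8535⟩,
     ⟨F.pv + 8536, F.pv + 24920⟩,
     ⟨F.gif + 96, F.gif + 100⟩,
     ⟨R.cur, R.cur + 8⟩]
  have hin : ∀ s, s ∈ Gif.Frames.DGifDecompressLine.prologue → s.idx + s.width ≤ 8 := by decide
  -- where the private object is: `LZOK` reads `[pv + 8, pv + 48)`, on the heap
  have hpin := henv.ok.owns.inside henv.heap.inv.heap (o := (F.pv, 24936)) (List.mem_cons_of_mem _ List.mem_cons_self)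
  have hbase := henv.heap.base
  simp only at hpin
  rw [hbase] at hpin
  have hpv1 : 0x800040 ≤ F.pv := hpin.1
  have hpv2 : F.pv + 24936 ≤ 0xC00000 := by omega
  clear hpin
  have hlz1 : LZOK (storesMem M0 (((e.reg .rsp).toNat - 120) / 8) Gif.Frames.DGifDecompressLine.prologue) F.pv := by
    apply hlz.sameExcept hsame1 (by omega)
    intro w hw
    simp only [List.mem_cons, List.not_mem_nil, or_false] at hw
    rcases hw with e1 | e1
    · rw [e1]
      left
      simp only
      omega
    · rw [e1]
      right
      simp only [shadowSpan]
      omega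
  rw [← hmem] at hinv1 hok1 hrem1 hsame1 hsame2 hlz1
  -- 5. THE EXIT ASSERTION: `Body` at 0x106b3d …
  have hbody : DGifDecompressLine.Body Gif.L.DGifDecompressLine.at_106b3d H rest frames F R n u₀ e ret s_106b33 := {
    entry := he0
    pre := hpre0
    -- `Line[0 … n)` does not meet the private object: from the precondition
    apart := by
      rcases hline with h0 | ⟨_, hap⟩
      · left
        exact h0
      · right
        exact hap
    rip := w_rip
    rsp := w_rsp
    -- a slot is read THROUGH the shadow stores (`readLE_storesMem`), then in `M0`
    slot_r15 := by
      rw [hmem, readLE_storesMem M0 _ 8 _ hin (by omega) _ _ (by u_omega)]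
      exact k_r15
    slot_r14 := by
      rw [hmem, readLE_storesMem M0 _ 8 _ hin (by omega) _ _ (by u_omega)]
      exact k_r14
    slot_r13 := by
      rw [hmem, readLE_storesMem M0 _ 8 _ hin (by omega) _ _ (by u_omega)]
      exact k_r13
    slot_r12 := by
      rw [hmem, readLE_storesMem M0 _ 8 _ hin (by omega) _ _ (by u_omega)]
      exact k_r12
    slot_rbp := by
      rw [hmem, readLE_storesMem M0 _ 8 _ hin (by omega) _ _ (by u_omega)]
      exact k_rbp
    slot_rbx := by
      rw [hmem, readLE_storesMem M0 _ 8 _ hin (by omega) _ _ (by u_omega)]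
      exact k_rbx
    -- the return address: the prologue's footprint ends below its slot
    slot_ra := by
      rw [prologue_same_readLE hsame1 (e.reg .rsp) 8 (Nat.le_refl _) (by omega)]
      exact he_retAddr
    -- the three arguments in their slots (106AF4H, 106AFEH, 106AF9H)
    s_gif := by
      rw [hmem, readLE_storesMem M0 _ 8 _ hin (by omega) _ _ (by u_omega)]
      rw [k_gif]
      exact hrdi
    s_len := by
      rw [hmem, readLE_storesMem M0 _ 8 _ hin (by omega) _ _ (by u_omega)]
      exact k_len
    s_line := by
      rw [hmem, readLE_storesMem M0 _ 8 _ hin (by omega) _ _ (by u_omega)]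
      exact k_line
    inv := hinv1
    ok := hok1
    lz := hlz1
    rem := Nat.le_of_eq hrem1
    same := hsame2
    code := ProgX.Base.conv_code_in w_eq
    -- DF and MXCSR by hand (`v_inv` is slow behind a walk with shadow stores)
    abi := by
      refine ProgX.Base.abiInv_of ?_ ?_
      · rw [w_flags]
        simp only [X86.User.df_setStatus]
        exact he_df
      · rw [w_mxcsr]
        exact he_mx
  }
  -- … and what only the first body segment may use: `rdi` the argument, `rbx` its copy, `r15` the shadow index
  refine ReachVia.done ?_
  exact {
    body := hbody
    rdi := w_kept.get .rdi rfl
    rbx := w_rbx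
    r15 := w_r15
  }
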